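-- pv_equiv track=rewrite | github.com/mattvisme/visme-dashboards | scripts/shared/msads_client.py | _strip_url
-- ===== SOURCE A (Python) =====
-- def _strip_url(raw_url):
--     """Strip domain from a display or final URL, return path only."""
--     if not raw_url:
--         return "/"
--     for prefix in ("https://www.visme.co", "https://visme.co",
--                    "http://www.visme.co", "http://visme.co",
--                    "www.visme.co", "visme.co"):
--         if raw_url.startswith(prefix):
--             path = raw_url[len(prefix):]
--             return path or "/"
--     return raw_url
-- ===== SOURCE B (Python) =====
-- def _strip_url(raw_url):
--     """Strip domain from a display or final URL, return path only."""
--     if not raw_url: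
--         return "/"
--     rest = raw_url
--     if rest.startswith("https://"):
--         rest = rest[8:]
--     elif rest.startswith("http://"):
--         rest = rest[7:]
--     if rest.startswith("www."):
--         rest = rest[4:]
--     if rest.startswith("visme.co"):
--         return rest[8:] or "/"
--     return raw_url
-- ===== Notes on version B (the rewrite author's own statement) =====
-- stated objective: simpler
-- what changed: Replaces the scan over six precomputed full prefixes with component-wise stripping: remove an optional scheme, then an optional 'www.', then test for the single literal 'visme.co'.
import Mathlib
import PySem

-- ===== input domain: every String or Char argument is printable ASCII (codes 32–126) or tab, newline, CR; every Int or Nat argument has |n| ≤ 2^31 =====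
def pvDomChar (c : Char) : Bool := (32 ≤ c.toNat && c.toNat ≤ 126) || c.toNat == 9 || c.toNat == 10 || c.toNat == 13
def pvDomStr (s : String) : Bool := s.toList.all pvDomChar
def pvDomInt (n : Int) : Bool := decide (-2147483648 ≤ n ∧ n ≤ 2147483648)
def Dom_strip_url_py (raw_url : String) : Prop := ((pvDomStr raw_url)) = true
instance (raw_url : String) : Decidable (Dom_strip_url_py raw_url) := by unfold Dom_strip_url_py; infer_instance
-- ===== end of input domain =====

-- B strips the URL component-wise (optional scheme, optional 'www.', then 'visme.co')
-- instead of A's scan over six precomputed full prefixes; objective: simpler.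

-- ===== PORT A =====
-- the for-loop over the prefix tuple, with its early return
def strip_url_py_go (prefixes : List String) (raw_url : String) : String :=
  match prefixes with
  | [] => raw_url
  | p :: ps =>
    if PySem.Str.startswith raw_url p then
      let path := PySem.Str.slice raw_url (some (PySem.Str.len p)) none
      if path = "" then "/" else path
    else strip_url_py_go ps raw_url

def strip_url_py (raw_url : String) : String :=
  if raw_url = "" then "/"
  else strip_url_py_go ["https://www.visme.co", "https://visme.co",
                        "http://www.visme.co", "http://visme.co",
                        "www.visme.co", "visme.co"] raw_url

-- ===== PORT B =====
def strip_url_py_alt (raw_url : String) : String :=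
  if raw_url = "" then "/"
  else
    let rest₀ := if PySem.Str.startswith raw_url "https://" then PySem.Str.slice raw_url (some 8) none
                 else if PySem.Str.startswith raw_url "http://" then PySem.Str.slice raw_url (some 7) none
                 else raw_url
    let rest := if PySem.Str.startswith rest₀ "www." then PySem.Str.slice rest₀ (some 4) none else rest₀
    if PySem.Str.startswith rest "visme.co" then
      let path := PySem.Str.slice rest (some 8) none
      if path = "" then "/" else path
    else raw_url

-- ===== PRECONDITION & SPEC =====
def Spec_strip_url_py (raw_url : String) (out : String) : Prop := out = strip_url_py_alt raw_url
instance (raw_url : String) (out : String) : Decidable (Spec_strip_url_py raw_url out) := by unfold Spec_strip_url_py; infer_instance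

-- ===== CLAIM (what is proved, stated in full; the proofs are below) =====
def Claim_equal_strip_url_py : Prop := ∀ (raw_url : String), Dom_strip_url_py raw_url → Spec_strip_url_py raw_url (strip_url_py raw_url)

-- ===== LEMMAS AND PROOFS =====
def pvGo (prefixes : List (List Char)) (l : List Char) : List Char :=
  match prefixes with
  | [] => l
  | p :: ps =>
    if p.isPrefixOf l then
      (if l.drop p.length = [] then ['/'] else l.drop p.length)
    else pvGo ps l

def pvB (l : List Char) : List Char :=
  let r0 := if "https://".toList.isPrefixOf l then l.drop 8
            else if "http://".toList.isPrefixOf l then l.drop 7 else l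
  let r := if "www.".toList.isPrefixOf r0 then r0.drop 4 else r0
  if "visme.co".toList.isPrefixOf r then (if r.drop 8 = [] then ['/'] else r.drop 8) else l

lemma str_eq_empty (s : String) : (s = "") ↔ s.toList = [] := by rw [← String.toList_inj]; rfl

lemma cond_toList (s p : String) : PySem.Str.startswith s p = p.toList.isPrefixOf s.toList := by
  rw [PySem.Str.startswith_eq]; rfl

lemma slice_from_toList (s : String) (n : Nat) :
    (PySem.Str.slice s (some (n : Int)) none).toList = s.toList.drop n := by
  rw [PySem.Str.toList_slice]
  exact PySem.List.slice_from_natCast _ n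

lemma toList_go (ps : List String) (raw : String) :
    (strip_url_py_go ps raw).toList = pvGo (ps.map String.toList) raw.toList := by
  induction ps with
  | nil => rfl
  | cons p ps ih =>
    simp only [strip_url_py_go, pvGo, List.map_cons, cond_toList]
    by_cases h : p.toList.isPrefixOf raw.toList
    · rw [if_pos h, if_pos h, apply_ite String.toList]
      have hlen : PySem.Str.len p = ((p.toList.length : Nat) : Int) := PySem.Str.len_eq p
      rw [hlen]
      simp only [str_eq_empty, slice_from_toList]
      rfl
    · rw [if_neg h, if_neg h, ih]

lemma slice8 (s : String) : (PySem.Str.slice s (some 8) none).toList = s.toList.drop 8 :=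
  slice_from_toList s 8
lemma slice7 (s : String) : (PySem.Str.slice s (some 7) none).toList = s.toList.drop 7 :=
  slice_from_toList s 7
lemma slice4 (s : String) : (PySem.Str.slice s (some 4) none).toList = s.toList.drop 4 :=
  slice_from_toList s 4

lemma toList_alt (raw : String) (hε : raw ≠ "") :
    (strip_url_py_alt raw).toList = pvB raw.toList := by
  simp only [strip_url_py_alt, if_neg hε, pvB]
  simp only [cond_toList, apply_ite String.toList, str_eq_empty, slice8, slice7, slice4,
    show "/".toList = ['/'] from by decide]

lemma not_pre_ext {a b l : List Char} (hab : a <+: b) (h : ¬ a <+: l) : ¬ b <+: l :=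
  fun hp => h (hab.trans hp)

lemma list_main (l : List Char) :
    pvGo ["https://www.visme.co".toList, "https://visme.co".toList, "http://www.visme.co".toList,
          "http://visme.co".toList, "www.visme.co".toList, "visme.co".toList] l = pvB l := by
  by_cases h1 : "https://".toList <+: l
  · obtain ⟨t, rfl⟩ := h1
    by_cases hw : "www.".toList <+: t
    · obtain ⟨u, rfl⟩ := hw
      simp [pvGo, pvB, List.isPrefixOf]
    · have cW : ¬ ((['w','w','w','.'] : List Char) <+: t) := not_pre_ext (by decide) hw
      have cWV : ¬ ((['w','w','w','.','v','i','s','m','e','.','c','o'] : List Char) <+: t) :=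
        not_pre_ext (by decide) hw
      simp [pvGo, pvB, List.isPrefixOf, cW, cWV]
  · by_cases h2 : "http://".toList <+: l
    · obtain ⟨t, rfl⟩ := h2
      by_cases hw : "www.".toList <+: t
      · obtain ⟨u, rfl⟩ := hw
        simp [pvGo, pvB, List.isPrefixOf]
      · have cW : ¬ ((['w','w','w','.'] : List Char) <+: t) := not_pre_ext (by decide) hw
        have cWV : ¬ ((['w','w','w','.','v','i','s','m','e','.','c','o'] : List Char) <+: t) :=
          not_pre_ext (by decide) hw
        simp [pvGo, pvB, List.isPrefixOf, cW, cWV]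
    · by_cases hw : "www.".toList <+: l
      · obtain ⟨u, rfl⟩ := hw
        simp [pvGo, pvB, List.isPrefixOf]
      · have cH : ¬ ((['h','t','t','p','s',':','/','/'] : List Char) <+: l) := not_pre_ext (by decide) h1
        have cH2 : ¬ ((['h','t','t','p',':','/','/'] : List Char) <+: l) := not_pre_ext (by decide) h2
        have c1 : ¬ ((['h','t','t','p','s',':','/','/','w','w','w','.','v','i','s','m','e','.','c','o'] : List Char) <+: l) :=
          not_pre_ext (by decide) h1
        have c2 : ¬ ((['h','t','t','p','s',':','/','/','v','i','s','m','e','.','c','o'] : List Char) <+: l) :=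
          not_pre_ext (by decide) h1
        have c3 : ¬ ((['h','t','t','p',':','/','/','w','w','w','.','v','i','s','m','e','.','c','o'] : List Char) <+: l) :=
          not_pre_ext (by decide) h2
        have c4 : ¬ ((['h','t','t','p',':','/','/','v','i','s','m','e','.','c','o'] : List Char) <+: l) :=
          not_pre_ext (by decide) h2
        have cW : ¬ ((['w','w','w','.'] : List Char) <+: l) := not_pre_ext (by decide) hw
        have c5 : ¬ ((['w','w','w','.','v','i','s','m','e','.','c','o'] : List Char) <+: l) :=
          not_pre_ext (by decide) hw
        simp [pvGo, pvB, cH, cH2, c1, c2, c3, c4, cW, c5]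

-- ===== VERDICT (by name: the statement is the Claim_ definition above) =====
theorem strip_url_py_spec : Claim_equal_strip_url_py := by
  intro raw _
  unfold Spec_strip_url_py
  by_cases hε : raw = ""
  · subst hε; rfl
  · rw [← String.toList_inj, toList_alt raw hε]
    simp only [strip_url_py, if_neg hε, toList_go, List.map]
    exact list_main raw.toList
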